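-- pv_equiv track=rewrite | github.com/benquick123/code-profiling | code/izpiti/izpit01a/M-17127-1306.py | roboti
-- ===== SOURCE A (Python) =====
-- def roboti(navodila, s):
--    slovar = {key: (0,0) for key in range(s)}
--    koords = {"S": (0, 1), "J": (0, -1), "V": (1, 0), "Z": (-1, 0)}
--    for num, ukaz in enumerate(navodila):
--        x, y = koords[ukaz]
--        x2, y2 = slovar[num%len(slovar)]
--        slovar[num % len(slovar)] = (x+x2, y+y2)
--    return [value for value in slovar.values()]
-- ===== SOURCE B (Python) =====
-- def roboti(navodila, s):
--     koords = {"S": (0, 1), "J": (0, -1), "V": (1, 0), "Z": (-1, 0)}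
--     buckets = [[] for _ in range(s)]
--     for num, ukaz in enumerate(navodila):
--         buckets[num % s].append(koords[ukaz])
--     res = []
--     for b in buckets:
--         x, y = 0, 0
--         for dx, dy in b:
--             x += dx
--             y += dy
--         res.append((x, y))
--     return res
-- ===== Notes on version B (the rewrite author's own statement) =====
-- stated objective: alternative
-- what changed: A scatter-accumulates running (x,y) sums into a dict keyed by robot index in one pass; B instead partitions the instructions' direction vectors into per-robot buckets indexed by num % s and then reduces each bucket to its coordinate sum (partition-then-reduce decomposition).
import Mathlib
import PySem

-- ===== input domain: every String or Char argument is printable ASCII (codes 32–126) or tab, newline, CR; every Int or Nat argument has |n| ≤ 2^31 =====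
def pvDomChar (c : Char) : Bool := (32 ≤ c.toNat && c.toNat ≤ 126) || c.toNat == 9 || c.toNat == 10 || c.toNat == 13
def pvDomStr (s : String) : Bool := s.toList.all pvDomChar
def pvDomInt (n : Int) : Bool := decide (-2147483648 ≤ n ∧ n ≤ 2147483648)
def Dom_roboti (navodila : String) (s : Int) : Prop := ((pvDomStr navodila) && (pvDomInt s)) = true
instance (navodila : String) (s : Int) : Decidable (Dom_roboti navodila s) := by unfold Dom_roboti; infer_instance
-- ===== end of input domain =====

-- B replaces A's dict scatter-accumulate by a partition-then-reduce over per-robot buckets (alternative decomposition, same cost).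


-- ===== PORT A =====
-- koords = {"S": (0, 1), "J": (0, -1), "V": (1, 0), "Z": (-1, 0)}  (same literal table in A and B)
def robotiKoords : PySem.Dict Char (Int × Int) :=
  PySem.Dict.ofList [('S', (0, 1)), ('J', (0, -1)), ('V', (1, 0)), ('Z', (-1, 0))]

-- one iteration of A's for-loop body
def robotiStep (d : PySem.Dict Int (Int × Int)) (nu : Int × Char) : PySem.Dict Int (Int × Int) :=
  let xy := robotiKoords.getD nu.2 (0, 0)        -- koords[ukaz]; Pre_ restricts chars to "SJVZ", where no KeyError occurs
  let k := PySem.Int.mod nu.1 (d.size : Int)     -- num % len(slovar); Pre_ excludes the ZeroDivisionError case len(slovar) = 0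
  let x2y2 := d.getD k (0, 0)                    -- slovar[num % len(slovar)]; the key is present (0 ≤ k < s)
  d.insert k (xy.1 + x2y2.1, xy.2 + x2y2.2)

def roboti (navodila : String) (s : Int) : List (Int × Int) :=
  let slovar : PySem.Dict Int (Int × Int) :=
    (PySem.List.pyRange 0 s 1).foldl (fun d key => d.insert key ((0 : Int), (0 : Int))) PySem.Dict.empty
  ((PySem.List.enumerate navodila.toList 0).foldl robotiStep slovar).values

-- ===== PORT B =====
-- buckets[num % s].append(koords[ukaz])  (exact under Pre_: there 0 ≤ num % s < len(buckets) and ukaz ∈ "SJVZ")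
def robotiAltStep (s : Int) (bs : List (List (Int × Int))) (nu : Int × Char) : List (List (Int × Int)) :=
  let k := PySem.Int.mod nu.1 s
  bs.set k.toNat (PySem.List.pyGetD bs k [] ++ [robotiKoords.getD nu.2 (0, 0)])

-- the inner reduce: x, y = 0, 0; for dx, dy in b: x += dx; y += dy
def robotiAltSum (b : List (Int × Int)) : Int × Int :=
  b.foldl (fun acc d => (acc.1 + d.1, acc.2 + d.2)) ((0 : Int), (0 : Int))

def roboti_alt (navodila : String) (s : Int) : List (Int × Int) :=
  let buckets : List (List (Int × Int)) := (PySem.List.pyRange 0 s 1).map (fun _ => ([] : List (Int × Int)))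
  ((PySem.List.enumerate navodila.toList 0).foldl (robotiAltStep s) buckets).foldl
    (fun res b => res ++ [robotiAltSum b]) []

-- ===== PRECONDITION & SPEC =====
-- Pre_ excludes exactly the inputs where Python A raises: a character outside "SJVZ" (KeyError), and
-- non-empty navodila with s ≤ 0 (len(slovar) = 0, ZeroDivisionError).
def Pre_roboti (navodila : String) (s : Int) : Prop :=
  (navodila.toList.all (fun c => c == 'S' || c == 'J' || c == 'V' || c == 'Z')) = true ∧
  (navodila.toList = [] ∨ 1 ≤ s)
instance (navodila : String) (s : Int) : Decidable (Pre_roboti navodila s) := by unfold Pre_roboti; infer_instance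
def pvWitness_roboti : String × Int := ("SJVZS", 2)

def Spec_roboti (navodila : String) (s : Int) (out : List (Int × Int)) : Prop := out = roboti_alt navodila s
instance (navodila : String) (s : Int) (out : List (Int × Int)) : Decidable (Spec_roboti navodila s out) := by unfold Spec_roboti; infer_instance

-- ===== CLAIM (what is proved, stated in full; the proofs are below) =====
def Claim_equal_roboti : Prop := ∀ (navodila : String) (s : Int), Dom_roboti navodila s → Pre_roboti navodila s → Spec_roboti navodila s (roboti navodila s)

-- ===== LEMMAS AND PROOFS =====

-- the displacement vector of one instruction
def pvKv (c : Char) : Int × Int := robotiKoords.getD c (0, 0)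

-- abstract effect of processing enumerated instructions l on a per-robot table, as a function of the robot index
def pvG (s : Int) (l : List (Int × Char)) (g : Int → Int × Int) : Int → Int × Int :=
  l.foldl (fun g p r =>
    if r = PySem.Int.mod p.1 s then ((pvKv p.2).1 + (g r).1, (pvKv p.2).2 + (g r).2) else g r) g

-- abstract effect on per-robot buckets
def pvH (s : Int) (l : List (Int × Char)) (h : Int → List (Int × Int)) : Int → List (Int × Int) :=
  l.foldl (fun h p r =>
    if r = PySem.Int.mod p.1 s then h r ++ [pvKv p.2] else h r) h

lemma pv_keys_mk_map (s : Int) (g : Int → Int × Int) :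
    (PySem.Dict.mk ((PySem.List.pyRange 0 s 1).map (fun r => (r, g r)))).keys =
      PySem.List.pyRange 0 s 1 := by
  simp [PySem.Dict.keys, List.map_map, Function.comp_def]

lemma pv_A_step (s : Int) (hs : 1 ≤ s) (g : Int → Int × Int) (p : Int × Char) :
    robotiStep (PySem.Dict.mk ((PySem.List.pyRange 0 s 1).map (fun r => (r, g r)))) p =
      PySem.Dict.mk ((PySem.List.pyRange 0 s 1).map (fun r => (r,
        if r = PySem.Int.mod p.1 s then ((pvKv p.2).1 + (g r).1, (pvKv p.2).2 + (g r).2) else g r))) := by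
  set D := PySem.Dict.mk ((PySem.List.pyRange 0 s 1).map (fun r => (r, g r))) with hD
  have hsize : ((D.size : Int)) = s := by
    simp [hD, PySem.Dict.size, PySem.List.length_pyRange_one]
    omega
  set k := PySem.Int.mod p.1 s with hk
  have hk0 : 0 ≤ k := PySem.Int.mod_nonneg _ (by omega)
  have hks : k < s := PySem.Int.mod_lt _ (by omega)
  have hkmem : k ∈ PySem.List.pyRange 0 s 1 := PySem.List.mem_pyRange_one.mpr ⟨hk0, hks⟩
  have hkeys : D.keys = PySem.List.pyRange 0 s 1 := pv_keys_mk_map s g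
  have hnodup : D.keys.Nodup := by rw [hkeys]; exact PySem.List.nodup_pyRange_one 0 s
  have hget : D.getD k (0, 0) = g k :=
    PySem.Dict.getD_of_mem_items D (List.mem_map_of_mem hkmem) hnodup (0, 0)
  have hcont : D.contains k = true := by
    rw [PySem.Dict.contains_eq_decide_mem_keys, hkeys]; simpa using hkmem
  show D.insert (PySem.Int.mod p.1 (D.size : Int)) _ = _
  rw [hsize, ← hk]
  apply PySem.Dict.ext
  rw [PySem.Dict.items_insert_of_contains D _ hcont, hget]
  show ((PySem.List.pyRange 0 s 1).map (fun r => (r, g r))).map _ = _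
  rw [List.map_map]
  apply List.map_congr_left
  intro r _
  by_cases hr : r = k
  · simp [Function.comp, hr, pvKv, robotiKoords]
  · simp [Function.comp, hr]

lemma pv_A_inv (s : Int) (hs : 1 ≤ s) :
    ∀ (l : List (Int × Char)) (g : Int → Int × Int),
      l.foldl robotiStep (PySem.Dict.mk ((PySem.List.pyRange 0 s 1).map (fun r => (r, g r)))) =
      PySem.Dict.mk ((PySem.List.pyRange 0 s 1).map (fun r => (r, pvG s l g r))) := by
  intro l
  induction l with
  | nil => intro g; simp [pvG]
  | cons p t ih =>
    intro g
    rw [List.foldl_cons, pv_A_step s hs g p]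
    exact ih _

lemma pv_set_map_pyRange {β : Type} (s k : Int) (f : Int → β) (v : β)
    (h0 : 0 ≤ k) (_hk : k < s) :
    (((PySem.List.pyRange 0 s 1).map f).set k.toNat v) =
      (PySem.List.pyRange 0 s 1).map (fun r => if r = k then v else f r) := by
  apply List.ext_getElem
  · simp
  · intro i h1 h2
    simp only [List.getElem_set, List.getElem_map, PySem.List.getElem_pyRange_one]
    have hlen : i < (s - 0).toNat := by
      simpa [PySem.List.length_pyRange_one] using h2
    split_ifs with ha hb hb
    · rfl
    · exfalso; apply hb; omega
    · exfalso; apply ha; omega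
    · rfl

lemma pv_B_step (s : Int) (hs : 1 ≤ s) (h : Int → List (Int × Int)) (p : Int × Char) :
    robotiAltStep s ((PySem.List.pyRange 0 s 1).map (fun r => h r)) p =
      (PySem.List.pyRange 0 s 1).map (fun r =>
        if r = PySem.Int.mod p.1 s then h r ++ [pvKv p.2] else h r) := by
  set k := PySem.Int.mod p.1 s
  have hk0 : 0 ≤ k := PySem.Int.mod_nonneg _ (by omega)
  have hks : k < s := PySem.Int.mod_lt _ (by omega)
  show ((PySem.List.pyRange 0 s 1).map (fun r => h r)).set k.toNat _ = _
  rw [PySem.List.pyGetD_map_pyRange_of_nonneg (fun r => h r) s k [] hk0 hks,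
    pv_set_map_pyRange s k (fun r => h r) _ hk0 hks]
  apply List.map_congr_left
  intro r _
  by_cases hr : r = k <;> simp [hr, pvKv]

lemma pv_B_inv (s : Int) (hs : 1 ≤ s) :
    ∀ (l : List (Int × Char)) (h : Int → List (Int × Int)),
      l.foldl (robotiAltStep s) ((PySem.List.pyRange 0 s 1).map (fun r => h r)) =
      (PySem.List.pyRange 0 s 1).map (fun r => pvH s l h r) := by
  intro l
  induction l with
  | nil => intro h; simp [pvH]
  | cons p t ih =>
    intro h
    rw [List.foldl_cons, pv_B_step s hs h p]
    exact ih _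

lemma pv_sum_inv (s : Int) :
    ∀ (l : List (Int × Char)) (g : Int → Int × Int) (h : Int → List (Int × Int)),
      (∀ r, robotiAltSum (h r) = g r) →
      ∀ r, robotiAltSum (pvH s l h r) = pvG s l g r := by
  intro l
  induction l with
  | nil => intro g h hgh r; simpa [pvH, pvG] using hgh r
  | cons p t ih =>
    intro g h hgh r
    show robotiAltSum (pvH s t _ r) = pvG s t _ r
    apply ih
    intro q
    by_cases hq : q = PySem.Int.mod p.1 s
    · subst hq
      beta_reduce
      rw [if_pos rfl, if_pos rfl]
      rw [show robotiAltSum (h (PySem.Int.mod p.1 s) ++ [pvKv p.2]) =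
            ((robotiAltSum (h (PySem.Int.mod p.1 s))).1 + (pvKv p.2).1,
             (robotiAltSum (h (PySem.Int.mod p.1 s))).2 + (pvKv p.2).2) from by
          simp [robotiAltSum, List.foldl_append]]
      rw [hgh]
      exact Prod.ext (by ring) (by ring)
    · beta_reduce
      rw [if_neg hq, if_neg hq]
      exact hgh q

-- ===== VERDICT (by name: the statement is the Claim_ definition above) =====
theorem roboti_spec : Claim_equal_roboti := by
  intro navodila s _ hpre
  obtain ⟨hchars, hcase⟩ := hpre
  unfold Spec_roboti
  by_cases hs : 1 ≤ s
  · have hinit :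
        (PySem.List.pyRange 0 s 1).foldl (fun d key => d.insert key ((0 : Int), (0 : Int))) PySem.Dict.empty
          = PySem.Dict.mk ((PySem.List.pyRange 0 s 1).map (fun r => (r, ((0 : Int), (0 : Int))))) := by
      apply PySem.Dict.ext
      have hfresh := PySem.Dict.items_foldl_insert_fresh (PySem.List.pyRange 0 s 1) (fun a => a)
        (fun _ => ((0 : Int), (0 : Int))) PySem.Dict.empty (by intro a _; simp)
        (by simpa using PySem.List.nodup_pyRange_one 0 s)
      simpa using hfresh
    show ((PySem.List.enumerate navodila.toList 0).foldl robotiStep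
        ((PySem.List.pyRange 0 s 1).foldl (fun d key => d.insert key ((0 : Int), (0 : Int)))
          PySem.Dict.empty)).values =
      ((PySem.List.enumerate navodila.toList 0).foldl (robotiAltStep s)
        ((PySem.List.pyRange 0 s 1).map (fun _ => ([] : List (Int × Int))))).foldl
        (fun res b => res ++ [robotiAltSum b]) []
    rw [hinit]
    rw [show ((PySem.List.pyRange 0 s 1).map (fun _ => ([] : List (Int × Int)))) =
        (PySem.List.pyRange 0 s 1).map (fun r => (fun _ => ([] : List (Int × Int))) r) from rfl]
    rw [show (PySem.Dict.mk ((PySem.List.pyRange 0 s 1).map (fun r => (r, ((0 : Int), (0 : Int)))))) =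
        PySem.Dict.mk ((PySem.List.pyRange 0 s 1).map (fun r => (r, (fun _ => ((0 : Int), (0 : Int))) r))) from rfl]
    rw [pv_A_inv s hs, pv_B_inv s hs]
    rw [PySem.List.foldl_append_singleton_eq_map robotiAltSum]
    simp only [PySem.Dict.values, List.map_map, List.nil_append]
    apply List.map_congr_left
    intro r _
    exact (pv_sum_inv s (PySem.List.enumerate navodila.toList 0)
      (fun _ => ((0 : Int), (0 : Int))) (fun _ => []) (fun _ => rfl) r).symm
  · have hnil : navodila.toList = [] := hcase.resolve_right hs
    have h0 : s ≤ 0 := by omega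
    simp [roboti, roboti_alt, hnil, PySem.List.pyRange_one_eq_nil h0, PySem.Dict.values,
      PySem.Dict.empty]
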